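-- pv_equiv track=rewrite | github.com/Decdec90/static | src/markdown_blocks.py | _strip_quote_markers
-- ===== SOURCE A (Python) =====
-- def _strip_quote_markers(block: str) -> str:
-- 	"""
-- 	Remove leading '>' or '> ' from each line in a quote block.
-- 	"""
-- 	lines = block.split("\n")
-- 	cleaned = []
-- 	for ln in lines:
-- 		if ln.startswith("> "):
-- 			cleaned.append(ln[2:])
-- 		elif ln.startswith(">"):
-- 			cleaned.append(ln[1:])
-- 		else:
-- 			cleaned.append(ln)
-- 	return "\n".join(cleaned)
-- ===== SOURCE B (Python) =====
-- def _strip_quote_markers(block: str) -> str: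
-- 	"""
-- 	Remove leading '>' or '> ' from each line in a quote block.
-- 	Single character-level pass with an at-line-start flag; no split/join.
-- 	"""
-- 	out = []
-- 	at_start = True
-- 	i = 0
-- 	n = len(block)
-- 	while i < n:
-- 		c = block[i]
-- 		if at_start and c == '>':
-- 			i += 2 if block[i + 1:i + 2] == ' ' else 1
-- 			at_start = False
-- 		else:
-- 			out.append(c)
-- 			at_start = (c == '\n')
-- 			i += 1
-- 	return ''.join(out)
-- ===== Notes on version B (the rewrite author's own statement) =====
-- stated objective: alternative
-- what changed: Replaces split-into-lines / per-line startswith branches / join with a single character-level scan that tracks an at-line-start flag and skips the quote marker plus at most one following space at each line start.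
import Mathlib
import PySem

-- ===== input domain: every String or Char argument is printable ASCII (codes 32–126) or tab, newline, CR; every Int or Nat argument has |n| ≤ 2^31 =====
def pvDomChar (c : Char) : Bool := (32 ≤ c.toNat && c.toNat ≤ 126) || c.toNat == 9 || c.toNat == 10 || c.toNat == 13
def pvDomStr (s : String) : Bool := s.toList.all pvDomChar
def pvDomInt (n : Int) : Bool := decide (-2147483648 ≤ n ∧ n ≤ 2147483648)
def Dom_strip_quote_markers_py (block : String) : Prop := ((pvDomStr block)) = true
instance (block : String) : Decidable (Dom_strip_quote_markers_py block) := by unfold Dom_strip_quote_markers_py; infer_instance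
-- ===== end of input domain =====

-- B is an alternative: one character-level pass with an at-line-start flag instead of split/branch/join.

-- ===== PORT A =====
-- clean one line: the if/elif/else body of A's loop
def pvCleanLine (ln : List Char) : List Char :=
  if PySem.Chars.startswith ln ['>', ' '] then PySem.Chars.slice ln (some 2) none
  else if PySem.Chars.startswith ln ['>'] then PySem.Chars.slice ln (some 1) none
  else ln

def strip_quote_markers_py (block : String) : String :=
  let lines := PySem.Chars.splitOn block.toList ['\n']
  let cleaned := lines.foldl (fun acc ln => acc ++ [pvCleanLine ln]) []
  String.ofList (PySem.Chars.join ['\n'] cleaned)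

-- ===== PORT B =====
-- the while loop of Source B: flag = at_start, list index advances 1 or 2
def pvAltGo : Bool → List Char → List Char
  | _, [] => []
  | true, '>' :: ' ' :: rest => pvAltGo false rest
  | true, '>' :: rest => pvAltGo false rest
  | _, c :: rest => c :: pvAltGo (c == '\n') rest

def strip_quote_markers_py_alt (block : String) : String :=
  String.ofList (pvAltGo true block.toList)

-- ===== PRECONDITION & SPEC =====
def Spec_strip_quote_markers_py (block : String) (out : String) : Prop := out = strip_quote_markers_py_alt block
instance (block : String) (out : String) : Decidable (Spec_strip_quote_markers_py block out) := by unfold Spec_strip_quote_markers_py; infer_instance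

-- ===== CLAIM (what is proved, stated in full; the proofs are below) =====
def Claim_equal_strip_quote_markers_py : Prop := ∀ (block : String), Dom_strip_quote_markers_py block → Spec_strip_quote_markers_py block (strip_quote_markers_py block)

-- ===== LEMMAS AND PROOFS =====

-- the line structure of a char list: split at every '\n' (never empty)
def pvLines : List Char → List (List Char)
  | [] => [[]]
  | c :: rest =>
    if c = '\n' then [] :: pvLines rest
    else (c :: (pvLines rest).headI) :: (pvLines rest).tail

theorem pvHeadTail {α : Type} [Inhabited α] (l : List α) (h : l ≠ []) : l.headI :: l.tail = l := by
  cases l with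
  | nil => exact absurd rfl h
  | cons a t => rfl

theorem pvLines_ne_nil (l : List Char) : pvLines l ≠ [] := by
  cases l with
  | nil => simp [pvLines]
  | cons c rest => simp only [pvLines]; split_ifs <;> simp

theorem pvGo_eq (fuel : Nat) : ∀ (l cur : List Char) (acc : List (List Char)),
    l.length ≤ fuel →
    PySem.Chars.splitOn.go ['\n'] fuel l cur acc =
      acc.reverse ++ ((cur.reverse ++ (pvLines l).headI) :: (pvLines l).tail) := by
  induction fuel with
  | zero =>
    intro l cur acc hl
    have : l = [] := List.eq_nil_of_length_eq_zero (Nat.le_zero.mp hl)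
    subst this
    simp [PySem.Chars.splitOn.go, pvLines]
  | succ fuel ih =>
    intro l cur acc hl
    cases l with
    | nil => simp [PySem.Chars.splitOn.go, pvLines]
    | cons c rest =>
      by_cases hc : c = '\n'
      · subst hc
        have hpre : List.isPrefixOf ['\n'] ('\n' :: rest) = true := by simp [List.isPrefixOf]
        rw [PySem.Chars.splitOn.go]
        simp only [hpre, if_true, List.length_singleton, List.drop_succ_cons, List.drop_zero]
        rw [ih rest [] (cur.reverse :: acc) (by simpa using Nat.lt_succ_iff.mp (by simpa using hl))]
        have hne := pvLines_ne_nil rest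
        simp [pvLines, pvHeadTail _ hne]
      · have hpre : List.isPrefixOf ['\n'] (c :: rest) = false := by
          simp [List.isPrefixOf, Ne.symm hc]
        rw [PySem.Chars.splitOn.go]
        simp only [hpre]
        rw [ih rest (c :: cur) acc (by simpa using Nat.lt_succ_iff.mp (by simpa using hl))]
        simp [pvLines, hc, List.append_assoc]

theorem pvSplitOn_eq (l : List Char) : PySem.Chars.splitOn l ['\n'] = pvLines l := by
  unfold PySem.Chars.splitOn
  rw [pvGo_eq (l.length + 1) l [] [] (Nat.le_succ _)]
  simpa using pvHeadTail _ (pvLines_ne_nil l)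

theorem pvClean_nil : pvCleanLine [] = [] := by decide

theorem pvClean_gt_space (t : List Char) : pvCleanLine ('>' :: ' ' :: t) = t := by
  have hsw : PySem.Chars.startswith ('>' :: ' ' :: t) ['>', ' '] = true := by
    simp [PySem.Chars.startswith, List.isPrefixOf]
  unfold pvCleanLine
  rw [hsw, if_pos rfl, PySem.Chars.slice_eq_listSlice,
    PySem.List.slice_from _ (by norm_num : (0 : Int) ≤ 2)]
  rfl

theorem pvClean_gt (t : List Char) (h : ∀ t', t ≠ ' ' :: t') : pvCleanLine ('>' :: t) = t := by
  have hsw : PySem.Chars.startswith ('>' :: t) ['>', ' '] = false := by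
    cases t with
    | nil => decide
    | cons a t' =>
      have : a ≠ ' ' := fun ha => h t' (by rw [ha])
      simp [PySem.Chars.startswith, List.isPrefixOf, Ne.symm this]
  have hsw1 : PySem.Chars.startswith ('>' :: t) ['>'] = true := by
    simp [PySem.Chars.startswith, List.isPrefixOf]
  unfold pvCleanLine
  rw [hsw, hsw1, if_neg (by simp), if_pos rfl, PySem.Chars.slice_eq_listSlice,
    PySem.List.slice_from _ (by norm_num : (0 : Int) ≤ 1)]
  rfl

theorem pvClean_other (c : Char) (t : List Char) (h : c ≠ '>') : pvCleanLine (c :: t) = c :: t := by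
  simp [pvCleanLine, PySem.Chars.startswith, List.isPrefixOf, Ne.symm h]

theorem pvJoin_cons (c : Char) (h : List Char) (xs : List (List Char)) :
    PySem.Chars.join ['\n'] ((c :: h) :: xs) = c :: PySem.Chars.join ['\n'] (h :: xs) := by
  cases xs with
  | nil => simp [PySem.Chars.join_singleton]
  | cons x xs' => simp [PySem.Chars.join_cons_cons]

theorem pvAltGo_other (b : Bool) (c : Char) (rest : List Char) (h : b = false ∨ c ≠ '>') :
    pvAltGo b (c :: rest) = c :: pvAltGo (c == '\n') rest := by
  cases b with
  | false => cases rest <;> simp [pvAltGo]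
  | true =>
    have hc : c ≠ '>' := h.resolve_left (by simp)
    cases rest with
    | nil => simp [pvAltGo, hc]
    | cons a t => simp [pvAltGo, hc]

theorem pvAltGo_gt (rest : List Char) (h : ∀ r', rest ≠ ' ' :: r') :
    pvAltGo true ('>' :: rest) = pvAltGo false rest := by
  cases rest with
  | nil => rfl
  | cons a t => simp only [pvAltGo]

theorem pvLines_headI_not_space (rest : List Char) (h : ∀ r', rest ≠ ' ' :: r') :
    ∀ t', (pvLines rest).headI ≠ ' ' :: t' := by
  intro t'
  cases rest with
  | nil => simp [pvLines]
  | cons a r =>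
    have ha : a ≠ ' ' := fun hh => h r (by rw [hh])
    by_cases hn : a = '\n'
    · simp [pvLines, hn]
    · simp only [pvLines, if_neg hn, List.headI_cons, ne_eq]
      intro hcons
      injection hcons with h1 _
      exact ha h1

theorem pvKey (l : List Char) :
    PySem.Chars.join ['\n'] ((pvLines l).map pvCleanLine) = pvAltGo true l ∧
    PySem.Chars.join ['\n'] ((pvLines l).headI :: (pvLines l).tail.map pvCleanLine) = pvAltGo false l :=
  match l with
  | [] => by constructor <;> simp [pvLines, pvClean_nil, PySem.Chars.join_singleton, pvAltGo]
  | c :: rest => by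
    by_cases hn : c = '\n'
    · subst hn
      have G := (pvKey rest).1
      have hne := pvLines_ne_nil rest
      obtain ⟨h0, t0, ht⟩ : ∃ h0 t0, pvLines rest = h0 :: t0 := by
        cases hh : pvLines rest with
        | nil => exact absurd hh hne
        | cons a b => exact ⟨a, b, rfl⟩
      have hl : pvLines ('\n' :: rest) = [] :: pvLines rest := by simp [pvLines]
      constructor <;>
      · rw [hl]
        show PySem.Chars.join ['\n'] ([] :: (pvLines rest).map pvCleanLine) = _
        rw [ht] at G ⊢
        simp only [List.map_cons, PySem.Chars.join_cons_cons, List.nil_append] at G ⊢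
        rw [List.singleton_append, G]
        rfl
    · have hlines : pvLines (c :: rest) = (c :: (pvLines rest).headI) :: (pvLines rest).tail := by
        simp [pvLines, hn]
      have H := (pvKey rest).2
      have Hside : PySem.Chars.join ['\n']
          ((c :: (pvLines rest).headI) :: (pvLines rest).tail.map pvCleanLine) =
          c :: pvAltGo false rest := by
        rw [pvJoin_cons, H]
      constructor
      · -- G part
        rw [hlines, List.map_cons]
        by_cases hg : c = '>'
        · subst hg
          have nonspace : (∀ r', rest ≠ ' ' :: r') →
              PySem.Chars.join ['\n']
                (pvCleanLine ('>' :: (pvLines rest).headI) ::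
                  List.map pvCleanLine (pvLines rest).tail) = pvAltGo true ('>' :: rest) := by
            intro hns
            rw [pvClean_gt _ (pvLines_headI_not_space rest hns), pvAltGo_gt rest hns]
            exact H
          cases rest with
          | nil => exact nonspace (by simp)
          | cons a r' =>
            by_cases hsp : a = ' '
            · subst hsp
              have hlines2 : pvLines (' ' :: r') = (' ' :: (pvLines r').headI) :: (pvLines r').tail := by
                simp [pvLines]
              rw [hlines2]
              simp only [List.headI_cons, List.tail_cons]
              rw [pvClean_gt_space, (pvKey r').2]
              rfl
            · exact nonspace (fun r hcon => hsp (by cases hcon; rfl))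
        · rw [pvClean_other c _ hg, pvJoin_cons, H, pvAltGo_other true c rest (Or.inr hg),
            show (c == '\n') = false by simp [hn]]
      · -- H part
        rw [hlines]
        simp only [List.headI_cons, List.tail_cons]
        rw [Hside, pvAltGo_other false c rest (Or.inl rfl),
          show (c == '\n') = false by simp [hn]]
  termination_by l.length
  decreasing_by all_goals (simp only [List.length_cons]; omega)

-- ===== VERDICT (by name: the statement is the Claim_ definition above) =====
theorem strip_quote_markers_py_spec : Claim_equal_strip_quote_markers_py := by
  intro block _
  unfold Spec_strip_quote_markers_py strip_quote_markers_py strip_quote_markers_py_alt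
  simp only [PySem.List.foldl_append_singleton_eq_map, List.nil_append, pvSplitOn_eq]
  exact congrArg String.ofList (pvKey block.toList).1
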